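-- pv_equiv track=rewrite | github.com/saritma/python-lesson | HW1/HW1_question1.py | trifeca
-- ===== SOURCE A (Python) =====
-- def trifeca(word):
--     """
--     Checks whether word contains three consecutive double-letter pairs.
--     word: string
--     returns: bool
--     """
--     count=0
--     for i in range(len(word)-1):
--         if word[i]==word[i+1]:
--             count=count+1
--     if count==3:
--         return True
--     else:
--         return False
-- ===== SOURCE B (Python) =====
-- def trifeca(word):
--     """
--     Checks whether word contains three consecutive double-letter pairs.
--     word: string
--     returns: bool
--     """
--     # Divide and conquer: the number of adjacent equal pairs of a string is
--     # the pair count of its left half, plus that of its right half, plus one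
--     # for the pair straddling the split point (if any).
--     def pairs(s):
--         if len(s) < 2:
--             return 0
--         m = len(s) // 2
--         return pairs(s[:m]) + pairs(s[m:]) + (s[m - 1] == s[m])
--     return pairs(word) == 3
-- ===== Notes on version B (the rewrite author's own statement) =====
-- stated objective: alternative
-- what changed: B computes the adjacent-equal-pair count by divide and conquer (recursively split the string at its midpoint, sum the halves' counts plus the boundary pair) instead of A's linear index loop, then compares to 3.
import Mathlib
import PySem

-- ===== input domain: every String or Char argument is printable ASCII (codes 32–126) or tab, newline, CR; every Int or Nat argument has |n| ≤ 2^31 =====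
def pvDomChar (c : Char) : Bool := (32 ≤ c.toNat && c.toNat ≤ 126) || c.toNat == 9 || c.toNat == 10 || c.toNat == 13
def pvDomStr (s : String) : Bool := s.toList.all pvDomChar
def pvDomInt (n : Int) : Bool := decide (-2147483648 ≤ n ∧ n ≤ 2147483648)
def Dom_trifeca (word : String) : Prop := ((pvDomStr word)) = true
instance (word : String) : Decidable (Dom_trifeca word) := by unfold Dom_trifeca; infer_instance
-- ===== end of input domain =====

-- B computes the adjacent-equal-pair count by divide and conquer (split at the midpoint, sum halves plus the boundary pair) instead of A's linear index loop; an alternative algorithm of similar cost.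


-- ===== PORT A =====
-- word[i] and word[i+1] are always in range for i in range(len(word)-1), so
-- Str.pyGet? never returns none here and comparing the options is exact.
def trifeca (word : String) : Bool :=
  let count := (PySem.List.pyRange 0 (PySem.Str.len word - 1) 1).foldl
    (fun count i =>
      if PySem.Str.pyGet? word i == PySem.Str.pyGet? word (i + 1) then count + 1 else count)
    (0 : Int)
  if count == 3 then true else false

-- ===== PORT B =====
-- pairs(s): s[:m] / s[m:] are List.take/drop; m-1 and m are nonnegative in-range
-- indices (1 ≤ m < len s there), so getElem? compared as options is exact.
def trifecaPairs (s : List Char) : Int :=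
  if s.length < 2 then 0
  else
    let m := s.length / 2
    trifecaPairs (s.take m) + trifecaPairs (s.drop m) +
      (if s[m - 1]? == s[m]? then 1 else 0)
termination_by s.length
decreasing_by
  · simp only [List.length_take]; omega
  · simp only [List.length_drop]; omega

def trifeca_alt (word : String) : Bool :=
  trifecaPairs word.toList == 3

-- ===== PRECONDITION & SPEC =====
def Spec_trifeca (word : String) (out : Bool) : Prop := out = trifeca_alt word
instance (word : String) (out : Bool) : Decidable (Spec_trifeca word out) := by unfold Spec_trifeca; infer_instance

-- ===== CLAIM (what is proved, stated in full; the proofs are below) =====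
def Claim_equal_trifeca : Prop := ∀ (word : String), Dom_trifeca word → Spec_trifeca word (trifeca word)

-- ===== LEMMAS AND PROOFS =====

/-- Number of adjacent equal pairs in a list of characters. -/
def pcNat : List Char → Nat
  | a :: b :: t => (if a = b then 1 else 0) + pcNat (b :: t)
  | _ => 0

theorem countP_range_pairs : ∀ l : List Char,
    List.countP (fun k => l[k]? == l[k + 1]?) (List.range (l.length - 1)) = pcNat l
  | [] => by simp [pcNat]
  | [a] => by simp [pcNat]
  | a :: b :: t => by
    have ih := countP_range_pairs (b :: t)
    simp only [List.length_cons] at ih ⊢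
    have hr : t.length + 1 + 1 - 1 = (t.length + 1 - 1) + 1 := by omega
    rw [hr, List.range_succ_eq_map, List.countP_cons, List.countP_map]
    have hp : ((fun k => (a :: b :: t)[k]? == (a :: b :: t)[k + 1]?) ∘ Nat.succ)
        = (fun k => (b :: t)[k]? == (b :: t)[k + 1]?) := by
      funext k
      simp [Nat.succ_eq_add_one]
    rw [hp, ih]
    by_cases h : a = b <;> simp [pcNat, h] <;> omega

theorem count_A_eq (word : String) :
    (PySem.List.pyRange 0 (PySem.Str.len word - 1) 1).foldl
      (fun count i =>
        if PySem.Str.pyGet? word i == PySem.Str.pyGet? word (i + 1) then count + 1 else count)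
      (0 : Int) = (pcNat word.toList : Int) := by
  rw [PySem.List.foldl_count_if, PySem.List.pyRange_one, List.countP_map]
  have hmain : (List.countP
      ((fun i => PySem.Str.pyGet? word i == PySem.Str.pyGet? word (i + 1)) ∘ fun k : Nat => (0 : Int) + ↑k)
      (List.range ((PySem.Str.len word - 1 - 0).toNat)))
      = List.countP (fun k => word.toList[k]? == word.toList[k + 1]?)
        (List.range (word.toList.length - 1)) := by
    have hl : (PySem.Str.len word - 1 - 0).toNat = word.toList.length - 1 := by
      rw [PySem.Str.len_eq]; omega
    rw [hl]
    apply List.countP_congr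
    intro k _
    have h2 : (0 : Int) + (k : Int) + 1 = (((k + 1 : Nat)) : Int) := by push_cast; omega
    have h1 : (0 : Int) + (k : Int) = ((k : Nat) : Int) := by omega
    rw [Function.comp, h2, h1, PySem.Str.pyGet?_natCast, PySem.Str.pyGet?_natCast]
  rw [hmain, countP_range_pairs]
  omega

/-- Splitting lemma: the pair count of a list splits at any interior cut point. -/
theorem pc_split : ∀ (m : ℕ) (s : List Char), 1 ≤ m → m < s.length →
    pcNat s = pcNat (s.take m) + pcNat (s.drop m) +
      (if s[m - 1]? == s[m]? then 1 else 0)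
  | 0, _, h1, _ => by omega
  | 1, s, _, h2 => by
    match s with
    | a :: b :: t =>
      simp [pcNat]
      by_cases h : a = b <;> simp [h] <;> omega
    | [] | [a] => simp at h2
  | (m' + 2), s, _, h2 => by
    match s with
    | a :: b :: t =>
      have ih := pc_split (m' + 1) (b :: t) (by omega)
        (by simp at h2 ⊢; omega)
      have htk : (a :: b :: t).take (m' + 2) = a :: (b :: t).take (m' + 1) := rfl
      have hdr : (a :: b :: t).drop (m' + 2) = (b :: t).drop (m' + 1) := rfl
      have htk2 : (b :: t).take (m' + 1) = b :: t.take m' := rfl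
      rw [htk, hdr, htk2]
      have hpc : pcNat (a :: b :: t.take m') = (if a = b then 1 else 0) + pcNat (b :: t.take m') := rfl
      have hpc2 : pcNat (a :: b :: t) = (if a = b then 1 else 0) + pcNat (b :: t) := rfl
      rw [hpc, hpc2, ← htk2, ih]
      have hg1 : (a :: b :: t)[m' + 2 - 1]? = (b :: t)[m' + 1 - 1]? := by
        simp
      have hg2 : (a :: b :: t)[m' + 2]? = (b :: t)[m' + 1]? := by
        simp
      rw [hg1, hg2]
      omega
    | [] | [a] => simp at h2

theorem trifecaPairs_eq : ∀ s : List Char, trifecaPairs s = (pcNat s : Int) := by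
  intro s
  induction hn : s.length using Nat.strong_induction_on generalizing s with
  | _ n ih =>
    rw [trifecaPairs]
    by_cases h : s.length < 2
    · match s, h with
      | [], _ => simp [pcNat]
      | [a], _ => simp [pcNat]
    · simp only [if_neg h]
      have hm1 : 1 ≤ s.length / 2 := by omega
      have hm2 : s.length / 2 < s.length := by omega
      rw [ih (s.take (s.length / 2)).length (by simp; omega) _ rfl,
          ih (s.drop (s.length / 2)).length (by simp; omega) _ rfl]
      rw [pc_split (s.length / 2) s hm1 hm2]
      push_cast
      by_cases hb : s[s.length / 2 - 1]? == s[s.length / 2]? <;> simp [hb]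

-- ===== VERDICT (by name: the statement is the Claim_ definition above) =====
theorem trifeca_spec : Claim_equal_trifeca := by
  intro word _
  unfold Spec_trifeca trifeca trifeca_alt
  simp only []
  rw [count_A_eq, trifecaPairs_eq]
  cases hx : ((pcNat word.toList : Int) == 3) <;> simp_all
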